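-- pv_equiv track=rewrite | github.com/LeeSeogMin/senior_mhealth_lecture | backend/libraries/voice_analysis/labeling/outcome_validation.py | _are_related_diagnoses
-- ===== SOURCE A (Python) =====
-- def _are_related_diagnoses(diag1: str, diag2: str) -> bool:
--     """
--     관련된 진단인지 확인
--
--     Args:
--         diag1: 진단 1
--         diag2: 진단 2
--
--     Returns:
--         관련 여부
--     """
--     related_groups = [
--         {'depression', 'major_depression', 'moderate_depression', 'mild_depression'},
--         {'anxiety', 'generalized_anxiety', 'panic_disorder', 'social_anxiety'},
--         {'bipolar', 'bipolar_1', 'bipolar_2', 'cyclothymia'},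
--         {'ptsd', 'acute_stress', 'adjustment_disorder'}
--     ]
--
--     for group in related_groups:
--         if diag1 in group and diag2 in group:
--             return True
--
--     return False
-- ===== SOURCE B (Python) =====
-- _GROUP_ID = {
--     'depression': 0, 'major_depression': 0, 'moderate_depression': 0, 'mild_depression': 0,
--     'anxiety': 1, 'generalized_anxiety': 1, 'panic_disorder': 1, 'social_anxiety': 1,
--     'bipolar': 2, 'bipolar_1': 2, 'bipolar_2': 2, 'cyclothymia': 2,
--     'ptsd': 3, 'acute_stress': 3, 'adjustment_disorder': 3,
-- }
--
--
-- def _are_related_diagnoses(diag1: str, diag2: str) -> bool: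
--     g1 = _GROUP_ID.get(diag1)
--     return g1 is not None and g1 == _GROUP_ID.get(diag2)
-- ===== Notes on version B (the rewrite author's own statement) =====
-- stated objective: idiomatic
-- what changed: Replaced the loop over a list of sets by a precomputed diagnosis->group-id dict: two hash lookups and an is-not-None-guarded comparison, no loop.
import Mathlib
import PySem

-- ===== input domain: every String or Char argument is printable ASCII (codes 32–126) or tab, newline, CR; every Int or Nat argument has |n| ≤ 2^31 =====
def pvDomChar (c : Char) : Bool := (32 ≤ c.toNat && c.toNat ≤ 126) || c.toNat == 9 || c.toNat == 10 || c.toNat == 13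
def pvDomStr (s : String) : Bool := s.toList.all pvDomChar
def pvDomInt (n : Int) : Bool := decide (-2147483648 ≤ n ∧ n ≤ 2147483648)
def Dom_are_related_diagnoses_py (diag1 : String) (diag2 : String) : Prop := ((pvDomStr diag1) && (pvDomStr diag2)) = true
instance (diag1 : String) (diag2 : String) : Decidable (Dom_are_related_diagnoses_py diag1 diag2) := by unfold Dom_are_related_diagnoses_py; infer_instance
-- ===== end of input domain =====

-- B replaces A's loop over a list of sets by one precomputed diagnosis→group-id dict
-- and a guarded comparison of two lookups (idiomatic; no loop at call time).

-- ===== PORT A =====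
-- the literal `related_groups` list of Python sets
def pvG0 : PySem.Set String := PySem.Set.ofList ["depression", "major_depression", "moderate_depression", "mild_depression"]
def pvG1 : PySem.Set String := PySem.Set.ofList ["anxiety", "generalized_anxiety", "panic_disorder", "social_anxiety"]
def pvG2 : PySem.Set String := PySem.Set.ofList ["bipolar", "bipolar_1", "bipolar_2", "cyclothymia"]
def pvG3 : PySem.Set String := PySem.Set.ofList ["ptsd", "acute_stress", "adjustment_disorder"]

def pvRelatedGroups : List (PySem.Set String) := [pvG0, pvG1, pvG2, pvG3]

-- the `for group in related_groups` loop with its early `return True`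
def pvGroupLoop (diag1 : String) (diag2 : String) : List (PySem.Set String) → Bool
  | [] => false
  | group :: rest =>
      if PySem.Set.contains group diag1 && PySem.Set.contains group diag2 then true
      else pvGroupLoop diag1 diag2 rest

def are_related_diagnoses_py (diag1 : String) (diag2 : String) : Bool :=
  pvGroupLoop diag1 diag2 pvRelatedGroups

-- ===== PORT B =====
-- the module-level `_GROUP_ID` dict literal
def pvGroupId : PySem.Dict String Int :=
  PySem.Dict.ofList
    [("depression", 0), ("major_depression", 0), ("moderate_depression", 0), ("mild_depression", 0),
     ("anxiety", 1), ("generalized_anxiety", 1), ("panic_disorder", 1), ("social_anxiety", 1),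
     ("bipolar", 2), ("bipolar_1", 2), ("bipolar_2", 2), ("cyclothymia", 2),
     ("ptsd", 3), ("acute_stress", 3), ("adjustment_disorder", 3)]

def are_related_diagnoses_py_alt (diag1 : String) (diag2 : String) : Bool :=
  match PySem.Dict.get? pvGroupId diag1 with
  | none => false                                   -- g1 is None → the `and` short-circuits to False
  | some g1 => PySem.Dict.get? pvGroupId diag2 == some g1   -- g1 == _GROUP_ID.get(diag2)

-- ===== PRECONDITION & SPEC =====
def Spec_are_related_diagnoses_py (diag1 : String) (diag2 : String) (out : Bool) : Prop := out = are_related_diagnoses_py_alt diag1 diag2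
instance (diag1 : String) (diag2 : String) (out : Bool) : Decidable (Spec_are_related_diagnoses_py diag1 diag2 out) := by unfold Spec_are_related_diagnoses_py; infer_instance

-- ===== CLAIM (what is proved, stated in full; the proofs are below) =====
def Claim_equal_are_related_diagnoses_py : Prop := ∀ (diag1 : String) (diag2 : String), Dom_are_related_diagnoses_py diag1 diag2 → Spec_are_related_diagnoses_py diag1 diag2 (are_related_diagnoses_py diag1 diag2)

-- ===== LEMMAS AND PROOFS =====

-- every string is either outside all groups (dict lookup misses, every set-membership
-- test is false) or in exactly one group i (dict lookup yields i, exactly group i's test hits)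
lemma pv_classify (d : String) :
    (PySem.Dict.get? pvGroupId d = none
      ∧ PySem.Set.contains pvG0 d = false
      ∧ PySem.Set.contains pvG1 d = false
      ∧ PySem.Set.contains pvG2 d = false
      ∧ PySem.Set.contains pvG3 d = false)
  ∨ (PySem.Dict.get? pvGroupId d = some 0
      ∧ PySem.Set.contains pvG0 d = true
      ∧ PySem.Set.contains pvG1 d = false
      ∧ PySem.Set.contains pvG2 d = false
      ∧ PySem.Set.contains pvG3 d = false)
  ∨ (PySem.Dict.get? pvGroupId d = some 1
      ∧ PySem.Set.contains pvG0 d = false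
      ∧ PySem.Set.contains pvG1 d = true
      ∧ PySem.Set.contains pvG2 d = false
      ∧ PySem.Set.contains pvG3 d = false)
  ∨ (PySem.Dict.get? pvGroupId d = some 2
      ∧ PySem.Set.contains pvG0 d = false
      ∧ PySem.Set.contains pvG1 d = false
      ∧ PySem.Set.contains pvG2 d = true
      ∧ PySem.Set.contains pvG3 d = false)
  ∨ (PySem.Dict.get? pvGroupId d = some 3
      ∧ PySem.Set.contains pvG0 d = false
      ∧ PySem.Set.contains pvG1 d = false
      ∧ PySem.Set.contains pvG2 d = false
      ∧ PySem.Set.contains pvG3 d = true) := by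
  by_cases h1 : d = "depression"; · subst h1; right; left; decide
  by_cases h2 : d = "major_depression"; · subst h2; right; left; decide
  by_cases h3 : d = "moderate_depression"; · subst h3; right; left; decide
  by_cases h4 : d = "mild_depression"; · subst h4; right; left; decide
  by_cases h5 : d = "anxiety"; · subst h5; right; right; left; decide
  by_cases h6 : d = "generalized_anxiety"; · subst h6; right; right; left; decide
  by_cases h7 : d = "panic_disorder"; · subst h7; right; right; left; decide
  by_cases h8 : d = "social_anxiety"; · subst h8; right; right; left; decide
  by_cases h9 : d = "bipolar"; · subst h9; right; right; right; left; decide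
  by_cases h10 : d = "bipolar_1"; · subst h10; right; right; right; left; decide
  by_cases h11 : d = "bipolar_2"; · subst h11; right; right; right; left; decide
  by_cases h12 : d = "cyclothymia"; · subst h12; right; right; right; left; decide
  by_cases h13 : d = "ptsd"; · subst h13; right; right; right; right; decide
  by_cases h14 : d = "acute_stress"; · subst h14; right; right; right; right; decide
  by_cases h15 : d = "adjustment_disorder"; · subst h15; right; right; right; right; decide
  left
  rw [show pvGroupId = PySem.Dict.mk
    [("depression", 0), ("major_depression", 0), ("moderate_depression", 0), ("mild_depression", 0),
     ("anxiety", 1), ("generalized_anxiety", 1), ("panic_disorder", 1), ("social_anxiety", 1),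
     ("bipolar", 2), ("bipolar_1", 2), ("bipolar_2", 2), ("cyclothymia", 2),
     ("ptsd", 3), ("acute_stress", 3), ("adjustment_disorder", 3)] from by decide]
  simp [pvG0, pvG1, pvG2, pvG3, PySem.Set.contains, PySem.Set.ofList,
        h1, h2, h3, h4, h5, h6, h7, h8, h9, h10, h11, h12, h13, h14, h15,
        Ne.symm h1, Ne.symm h2, Ne.symm h3, Ne.symm h4, Ne.symm h5, Ne.symm h6, Ne.symm h7,
        Ne.symm h8, Ne.symm h9, Ne.symm h10, Ne.symm h11, Ne.symm h12, Ne.symm h13,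
        Ne.symm h14, Ne.symm h15, PySem.Dict.get?]

-- ===== VERDICT (by name: the statement is the Claim_ definition above) =====
theorem are_related_diagnoses_py_spec : Claim_equal_are_related_diagnoses_py := by
  intro d1 d2 _
  unfold Spec_are_related_diagnoses_py are_related_diagnoses_py are_related_diagnoses_py_alt
  rcases pv_classify d1 with ⟨e, a0, a1, a2, a3⟩ | ⟨e, a0, a1, a2, a3⟩ | ⟨e, a0, a1, a2, a3⟩ |
    ⟨e, a0, a1, a2, a3⟩ | ⟨e, a0, a1, a2, a3⟩ <;>
  rcases pv_classify d2 with ⟨f, b0, b1, b2, b3⟩ | ⟨f, b0, b1, b2, b3⟩ | ⟨f, b0, b1, b2, b3⟩ |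
    ⟨f, b0, b1, b2, b3⟩ | ⟨f, b0, b1, b2, b3⟩ <;>
  · simp only [pvRelatedGroups, pvGroupLoop, a0, a1, a2, a3, b0, b1, b2, b3, e, f]
    decide
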